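-- pv_equiv track=rewrite | github.com/GT-Edge-AI-Internal/gt-ai-os-community | apps/tenant-backend/app/services/task_classifier.py | _can_execute_parallel
-- ===== SOURCE A (Python) =====
-- from typing import Dict, Any, List, Optional, Tuple
--
-- def _can_execute_parallel(subagent_plan: List[Dict[str, Any]]) -> bool:
--     """Check if any subagents can run in parallel"""
--     if len(subagent_plan) < 2:
--         return False
--
--     # Group by priority to find parallel opportunities
--     priority_groups = {}
--     for agent in subagent_plan:
--         priority = agent.get("priority", 1)
--         if priority not in priority_groups:
--             priority_groups[priority] = []
--         priority_groups[priority].append(agent)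
--
--     # If any priority level has multiple agents, parallel execution is possible
--     return any(len(agents) > 1 for agents in priority_groups.values())
-- ===== SOURCE B (Python) =====
-- def _can_execute_parallel(subagent_plan):
--     """Check if any subagents can run in parallel"""
--     seen = set()
--     for agent in subagent_plan:
--         priority = agent.get("priority", 1)
--         if priority in seen:
--             return True
--         seen.add(priority)
--     return False
-- ===== Notes on version B (the rewrite author's own statement) =====
-- stated objective: simpler
-- what changed: Replaces A's two passes (grouping all agents into a dict of priority->list, then scanning group sizes) with a single early-exiting pass that keeps only a set of priorities already seen and returns True on the first repeat.
import Mathlib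
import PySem

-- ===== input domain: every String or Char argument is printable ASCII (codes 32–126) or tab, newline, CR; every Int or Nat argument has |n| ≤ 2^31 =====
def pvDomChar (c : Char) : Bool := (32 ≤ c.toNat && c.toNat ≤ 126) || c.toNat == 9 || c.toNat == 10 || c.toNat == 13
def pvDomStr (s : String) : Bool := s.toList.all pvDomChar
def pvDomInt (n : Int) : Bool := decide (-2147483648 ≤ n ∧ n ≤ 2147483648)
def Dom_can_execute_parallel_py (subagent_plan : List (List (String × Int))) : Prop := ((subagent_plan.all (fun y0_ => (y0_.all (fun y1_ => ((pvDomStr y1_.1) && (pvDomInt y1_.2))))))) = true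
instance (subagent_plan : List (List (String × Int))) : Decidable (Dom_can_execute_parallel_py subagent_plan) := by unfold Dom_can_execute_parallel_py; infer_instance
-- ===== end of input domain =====

-- B replaces A's two passes (group all agents by priority into a dict-of-lists, then scan the
-- groups for one of size > 1) by a single early-exiting pass that only maintains the set of
-- priorities seen so far; objective: simpler.

-- ===== PORT A =====

def pvGetPriority (agent : List (String × Int)) : Int :=
  PySem.Dict.getD (PySem.Dict.mk agent) "priority" 1

def can_execute_parallel_py (subagent_plan : List (List (String × Int))) : Bool :=
  if subagent_plan.length < 2 then false
  else
    let priority_groups :=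
      subagent_plan.foldl
        (fun (g : PySem.Dict Int (List (List (String × Int)))) agent =>
          let p := pvGetPriority agent
          let g := if g.contains p then g else g.insert p []
          g.modify p [] (· ++ [agent]))
        PySem.Dict.empty
    (PySem.Dict.values priority_groups).any (fun agents => decide (agents.length > 1))


-- ===== PORT B =====
def pvAltGo : List (List (String × Int)) → PySem.Set Int → Bool
  | [], _ => false
  | agent :: rest, seen =>
    let p := pvGetPriority agent
    if PySem.Set.contains seen p then true else pvAltGo rest (PySem.Set.add seen p)

def can_execute_parallel_py_alt (subagent_plan : List (List (String × Int))) : Bool :=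
  pvAltGo subagent_plan PySem.Set.empty


-- ===== PRECONDITION & SPEC =====
def Spec_can_execute_parallel_py (subagent_plan : List (List (String × Int))) (out : Bool) : Prop := out = can_execute_parallel_py_alt subagent_plan
instance (subagent_plan : List (List (String × Int))) (out : Bool) : Decidable (Spec_can_execute_parallel_py subagent_plan out) := by unfold Spec_can_execute_parallel_py; infer_instance

-- ===== CLAIM (what is proved, stated in full; the proofs are below) =====
def Claim_equal_can_execute_parallel_py : Prop := ∀ (subagent_plan : List (List (String × Int))), Dom_can_execute_parallel_py subagent_plan → Spec_can_execute_parallel_py subagent_plan (can_execute_parallel_py subagent_plan)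

-- ===== LEMMAS AND PROOFS =====
lemma pvStep_eq (g : PySem.Dict Int (List (List (String × Int)))) (p : Int) (a : List (String × Int)) :
    ((if g.contains p then g else g.insert p []).modify p [] (· ++ [a])) = g.modify p [] (· ++ [a]) := by
  by_cases hc : g.contains p = true
  · simp [hc]
  · have hc' : g.contains p = false := by simpa using hc
    have hall : ∀ q ∈ g.items, (q.1 == p) = false := by
      simpa [PySem.Dict.contains] using hc'
    simp only [hc', Bool.false_eq_true, if_false]
    apply PySem.Dict.ext
    simp only [PySem.Dict.modify]
    rw [PySem.Dict.getD_insert_self, PySem.Dict.getD_of_not_contains _ _ hc']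
    rw [PySem.Dict.items_insert_of_contains _ _ (PySem.Dict.contains_insert_self _ _ _),
        PySem.Dict.items_insert_of_not_contains _ _ hc',
        PySem.Dict.items_insert_of_not_contains _ _ hc']
    simp only [List.map_append, List.map_cons, List.map_nil, BEq.rfl, if_true, List.nil_append]
    congr 1
    calc List.map (fun q => if (q.1 == p) = true then (p, [a]) else q) g.items
        = List.map id g.items := List.map_congr_left (fun q hq => by simp [hall q hq])
      _ = g.items := List.map_id g.items

lemma pvA_fold (plan : List (List (String × Int))) :
    (plan.foldl
        (fun (g : PySem.Dict Int (List (List (String × Int)))) agent =>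
          let p := pvGetPriority agent
          let g := if g.contains p then g else g.insert p []
          g.modify p [] (· ++ [agent]))
        PySem.Dict.empty)
    = plan.foldl (fun g agent => g.modify (pvGetPriority agent) [] (· ++ [agent])) PySem.Dict.empty := by
  congr 1
  funext g agent
  exact pvStep_eq g (pvGetPriority agent) agent

lemma pvA_getD (plan : List (List (String × Int))) (c : Int) :
    (plan.foldl (fun (g : PySem.Dict Int (List (List (String × Int)))) agent => g.modify (pvGetPriority agent) [] (· ++ [agent])) PySem.Dict.empty).getD c []
    = plan.filter (fun a => pvGetPriority a == c) := by
  have h := PySem.Dict.getD_foldl_modify_append (plan.map (fun a => (pvGetPriority a, a))) PySem.Dict.empty c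
  rw [List.foldl_map] at h
  simpa [List.filter_map, Function.comp_def] using h

lemma pvA_keys (plan : List (List (String × Int))) :
    (plan.foldl (fun (g : PySem.Dict Int (List (List (String × Int)))) agent => g.modify (pvGetPriority agent) [] (· ++ [agent])) PySem.Dict.empty).keys
    = PySem.Set.ofList (plan.map pvGetPriority) := by
  have h := PySem.Dict.keys_foldl_modify_key plan pvGetPriority [] (fun _ agent v => v ++ [agent]) PySem.Dict.empty
  simpa [PySem.Set.update_nil_left, PySem.Dict.keys] using h

lemma pvA_char (plan : List (List (String × Int))) (h2 : ¬ plan.length < 2) :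
    can_execute_parallel_py plan
    = (PySem.Set.ofList (plan.map pvGetPriority)).any
        (fun p => decide (1 < (plan.map pvGetPriority).count p)) := by
  unfold can_execute_parallel_py
  rw [if_neg h2]
  show ((plan.foldl
        (fun (g : PySem.Dict Int (List (List (String × Int)))) agent =>
          let p := pvGetPriority agent
          let g := if g.contains p then g else g.insert p []
          g.modify p [] (· ++ [agent]))
        PySem.Dict.empty).values.any (fun agents => decide (agents.length > 1))) = _
  rw [pvA_fold]
  have hnd : (plan.foldl (fun (g : PySem.Dict Int (List (List (String × Int)))) agent => g.modify (pvGetPriority agent) [] (· ++ [agent])) PySem.Dict.empty).keys.Nodup :=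
    PySem.Dict.nodup_keys_foldl_modify_key plan pvGetPriority [] (fun _ agent v => v ++ [agent]) _
      (by simp [PySem.Dict.keys, PySem.Dict.empty])
  rw [PySem.Dict.values_eq_map_keys _ hnd [], List.any_map, pvA_keys]
  congr 1
  funext p
  rw [Function.comp_apply, pvA_getD]
  rw [show List.count p (plan.map pvGetPriority) = (plan.filter (fun a => pvGetPriority a == p)).length by
        rw [List.count, List.countP_map, ← List.countP_eq_length_filter]; rfl]

lemma pvAltGo_eq_false_iff (l : List (List (String × Int))) (seen : PySem.Set Int) :
    pvAltGo l seen = false ↔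
      (l.map pvGetPriority).Nodup ∧ ∀ p ∈ l.map pvGetPriority, p ∉ seen := by
  induction l generalizing seen with
  | nil => simp [pvAltGo]
  | cons a rest ih =>
    show (if PySem.Set.contains seen (pvGetPriority a) then true
          else pvAltGo rest (PySem.Set.add seen (pvGetPriority a))) = false ↔ _
    by_cases h : PySem.Set.contains seen (pvGetPriority a) = true
    · have hmem := (PySem.Set.contains_iff seen (pvGetPriority a)).mp h
      rw [if_pos h]
      constructor
      · intro hf; cases hf
      · rintro ⟨-, hall⟩
        exact absurd hmem (hall _ (List.mem_cons.mpr (Or.inl rfl)))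
    · have hm : pvGetPriority a ∉ seen := fun hmem => h ((PySem.Set.contains_iff _ _).mpr hmem)
      rw [if_neg (by simpa using h), ih]
      constructor
      · rintro ⟨hnd, hall⟩
        rw [List.map_cons, List.nodup_cons]
        refine ⟨⟨fun hin => ?_, hnd⟩, fun p hp => ?_⟩
        · have := hall _ hin
          rw [PySem.Set.mem_add] at this
          exact this (Or.inr rfl)
        · rcases List.mem_cons.mp hp with rfl | hp'
          · exact hm
          · intro hpseen
            exact hall _ hp' ((PySem.Set.mem_add _ _ _).mpr (Or.inl hpseen))
      · rw [List.map_cons, List.nodup_cons]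
        rintro ⟨⟨hna, hnd⟩, hall⟩
        refine ⟨hnd, fun p hp hpadd => ?_⟩
        rcases (PySem.Set.mem_add _ _ _).mp hpadd with hpseen | rfl
        · exact hall _ (List.mem_cons.mpr (Or.inr hp)) hpseen
        · exact hna hp

lemma pvB_false_iff (plan : List (List (String × Int))) :
    can_execute_parallel_py_alt plan = false ↔ (plan.map pvGetPriority).Nodup := by
  unfold can_execute_parallel_py_alt
  rw [pvAltGo_eq_false_iff]
  simp [PySem.Set.empty]

theorem pvMain (plan : List (List (String × Int))) :
    can_execute_parallel_py plan = can_execute_parallel_py_alt plan := by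
  by_cases h2 : plan.length < 2
  · have hnd : (plan.map pvGetPriority).Nodup := by
      rcases plan with _ | ⟨a, _ | ⟨b, t⟩⟩
      · simp
      · simp
      · simp at h2
    rw [(pvB_false_iff plan).mpr hnd]
    show (if plan.length < 2 then false else _) = false
    exact if_pos h2
  · rw [pvA_char plan h2]
    by_cases hnd : (plan.map pvGetPriority).Nodup
    · rw [(pvB_false_iff plan).mpr hnd]
      rw [List.any_eq_false]
      intro p hp
      simp only [decide_eq_true_eq, not_lt]
      exact List.nodup_iff_count_le_one.mp hnd p
    · have hB : can_execute_parallel_py_alt plan = true := by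
        rcases hb : can_execute_parallel_py_alt plan
        · exact absurd ((pvB_false_iff plan).mp hb) hnd
        · rfl
      rw [hB, List.any_eq_true]
      rw [List.nodup_iff_count_le_one] at hnd
      push Not at hnd
      obtain ⟨p, hp⟩ := hnd
      have hmem : p ∈ plan.map pvGetPriority := by
        rw [← List.count_pos_iff]; omega
      exact ⟨p, (PySem.Set.mem_ofList _ _).mpr hmem, by simpa using hp⟩

-- ===== VERDICT (by name: the statement is the Claim_ definition above) =====
theorem can_execute_parallel_py_spec : Claim_equal_can_execute_parallel_py := by
  intro subagent_plan _
  unfold Spec_can_execute_parallel_py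
  exact pvMain subagent_plan
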